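-- pv_equiv track=rewrite | github.com/teman67/Annotation_NER_LLM_NextJS | streamlit_app/helper_manual_annotations.py | try_fuzzy_fix
-- ===== SOURCE A (Python) =====
-- def find_all_occurrences(text, pattern):
--     """Find all occurrences of pattern in text"""
--     positions = []
--     start = 0
--     while True:
--         pos = text.find(pattern, start)
--         if pos == -1:
--             break
--         positions.append((pos, pos + len(pattern)))
--         start = pos + 1
--     return positions
--
-- def try_fuzzy_fix(text, expected_text, original_start, original_end):
--     """Try to fix common annotation errors"""
--     # Try removing/adding whitespace
--     variations = [
--         expected_text.strip(),
--         expected_text.lstrip(),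
--         expected_text.rstrip(),
--         ' ' + expected_text,
--         expected_text + ' ',
--         ' ' + expected_text + ' '
--     ]
--
--     for variation in variations:
--         positions = find_all_occurrences(text, variation)
--         if positions:
--             # Return the closest match to original position
--             closest = min(positions, key=lambda x: abs(x[0] - original_start))
--             return closest
--
--     # Try case variations
--     case_variations = [
--         expected_text.lower(),
--         expected_text.upper(),
--         expected_text.capitalize()
--     ]
--
--     for variation in case_variations:
--         positions = find_all_occurrences(text, variation)
--         if positions:
--             closest = min(positions, key=lambda x: abs(x[0] - original_start))
--             return closest
--
--     return None
-- ===== SOURCE B (Python) =====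
-- def _closest(text, pat, s):
--     # Outward selection without enumerating all occurrences: walk matches only
--     # until the first one at or past s, keeping the last one before it.
--     pos = text.find(pat)
--     if pos == -1:
--         return None
--     prev = pos
--     while pos != -1 and pos < s:
--         prev = pos
--         pos = text.find(pat, pos + 1)
--     best = prev if pos == -1 or s - prev <= pos - s else pos
--     return (best, best + len(pat))
--
--
-- def try_fuzzy_fix(text, expected_text, original_start, original_end):
--     """Try to fix common annotation errors"""
--     e = expected_text
--     for variation in (e.strip(), e.lstrip(), e.rstrip(),
--                       ' ' + e, e + ' ', ' ' + e + ' ',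
--                       e.lower(), e.upper(), e.capitalize()):
--         r = _closest(text, variation, original_start)
--         if r is not None:
--             return r
--     return None
-- ===== Notes on version B (the rewrite author's own statement) =====
-- stated objective: alternative
-- what changed: Instead of collecting every occurrence of each variation into a list and taking min(key=abs(pos-original_start)), B walks the find() chain only until the first occurrence at or past original_start, keeps its predecessor, and picks between those two neighbours arithmetically (no list, no min pass, early exit).
import Mathlib
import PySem

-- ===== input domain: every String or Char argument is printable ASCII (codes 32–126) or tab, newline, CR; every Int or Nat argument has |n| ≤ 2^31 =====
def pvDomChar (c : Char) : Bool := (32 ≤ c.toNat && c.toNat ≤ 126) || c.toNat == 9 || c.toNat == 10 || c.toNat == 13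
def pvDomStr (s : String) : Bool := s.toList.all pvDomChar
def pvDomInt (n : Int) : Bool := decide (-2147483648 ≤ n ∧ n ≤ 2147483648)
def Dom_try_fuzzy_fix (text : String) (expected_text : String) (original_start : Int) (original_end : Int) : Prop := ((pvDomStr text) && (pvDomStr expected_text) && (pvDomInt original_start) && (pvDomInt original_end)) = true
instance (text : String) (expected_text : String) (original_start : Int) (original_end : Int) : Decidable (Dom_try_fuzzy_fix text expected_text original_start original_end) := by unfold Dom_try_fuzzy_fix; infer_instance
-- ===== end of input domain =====

-- B walks the occurrences with str.find only up to the first one at/past original_start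
-- (keeping its predecessor) instead of A's collect-all-occurrences list plus min(key=abs);
-- objective: alternative decomposition (early exit, no list, no min pass).

-- str.capitalize for ASCII: first char uppercased, rest lowercased (exact on the ASCII domain)
def pyCapitalize (cs : List Char) : List Char :=
  match cs with
  | [] => []
  | c :: rest => PySem.Chars.upperChar c :: PySem.Chars.lower rest

-- ===== PORT A =====
-- find_all_occurrences: the while loop, recursing on the next search start
-- (fuel only makes the recursion structural; text.length + 1 - start never runs out)
def findAllGo (t p : List Char) : Nat → Nat → List (Int × Int)
  | 0, _ => []
  | fuel + 1, start =>
    let pos := PySem.Chars.findFrom t p (start : Int) none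
    if pos = -1 then []
    else (pos, pos + (p.length : Int)) :: findAllGo t p fuel (pos.toNat + 1)

def find_all_occurrences (text pattern : List Char) : List (Int × Int) :=
  findAllGo text pattern (text.length + 1) 0

-- the 'for variation in …' loop: first variation with occurrences wins, closest by abs
def tryVariations (t : List Char) (s : Int) : List (List Char) → Option (Int × Int)
  | [] => none
  | v :: rest =>
    let positions := find_all_occurrences t v
    if positions.isEmpty then tryVariations t s rest
    else PySem.List.min? positions (fun x => |x.1 - s|)

def try_fuzzy_fix (text : String) (expected_text : String) (original_start : Int) (original_end : Int) : Option (Int × Int) :=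
  let t := text.toList
  let e := expected_text.toList
  let variations := [PySem.Chars.strip e, PySem.Chars.lstrip e, PySem.Chars.rstrip e,
                     ' ' :: e, e ++ [' '], ' ' :: (e ++ [' '])]
  match tryVariations t original_start variations with
  | some r => some r
  | none =>
    let case_variations := [PySem.Chars.lower e, PySem.Chars.upper e, pyCapitalize e]
    tryVariations t original_start case_variations

-- ===== PORT B =====
-- the while loop of _closest: pos recomputed from the running start index; same fuel device
def closestGo (t p : List Char) (s : Int) : Nat → Nat → Int → Int
  | 0, _, prev => prev
  | fuel + 1, start, prev =>
    let pos := PySem.Chars.findFrom t p (start : Int) none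
    if pos = -1 ∨ s ≤ pos then
      if pos = -1 ∨ s - prev ≤ pos - s then prev else pos
    else closestGo t p s fuel (pos.toNat + 1) pos

def closest (t p : List Char) (s : Int) : Option (Int × Int) :=
  let pos := PySem.Chars.findFrom t p 0 none
  if pos = -1 then none
  else
    let best := closestGo t p s (t.length + 1) 0 pos
    some (best, best + (p.length : Int))

def tryAlt (t : List Char) (s : Int) : List (List Char) → Option (Int × Int)
  | [] => none
  | v :: rest =>
    match closest t v s with
    | some r => some r
    | none => tryAlt t s rest

def try_fuzzy_fix_alt (text : String) (expected_text : String) (original_start : Int) (original_end : Int) : Option (Int × Int) :=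
  let e := expected_text.toList
  tryAlt text.toList original_start
    [PySem.Chars.strip e, PySem.Chars.lstrip e, PySem.Chars.rstrip e,
     ' ' :: e, e ++ [' '], ' ' :: (e ++ [' ']),
     PySem.Chars.lower e, PySem.Chars.upper e, pyCapitalize e]

-- ===== PRECONDITION & SPEC =====
def Spec_try_fuzzy_fix (text : String) (expected_text : String) (original_start : Int) (original_end : Int) (out : Option (Int × Int)) : Prop := out = try_fuzzy_fix_alt text expected_text original_start original_end
instance (text : String) (expected_text : String) (original_start : Int) (original_end : Int) (out : Option (Int × Int)) : Decidable (Spec_try_fuzzy_fix text expected_text original_start original_end out) := by unfold Spec_try_fuzzy_fix; infer_instance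

-- ===== CLAIM (what is proved, stated in full; the proofs are below) =====
def Claim_equal_try_fuzzy_fix : Prop := ∀ (text : String) (expected_text : String) (original_start : Int) (original_end : Int), Dom_try_fuzzy_fix text expected_text original_start original_end → Spec_try_fuzzy_fix text expected_text original_start original_end (try_fuzzy_fix text expected_text original_start original_end)

-- ===== LEMMAS AND PROOFS =====

-- text.find(p, k) returns -1 once the start index is past the end (CPython slice rule)
theorem findFrom_gt_len (t p : List Char) (k : Nat) (h : t.length < k) :
    PySem.Chars.findFrom t p (k : Int) none = -1 := by
  simp only [PySem.Chars.findFrom]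
  split
  · exfalso; omega
  · rw [if_pos (by exact_mod_cast h)]

-- a successful find from k ≤ len lands between k and len
theorem findFrom_bounds (t p : List Char) (k : Nat) (hk : k ≤ t.length)
    (h : PySem.Chars.findFrom t p (k : Int) none ≠ -1) :
    (k : Int) ≤ PySem.Chars.findFrom t p (k : Int) none ∧
      PySem.Chars.findFrom t p (k : Int) none ≤ (t.length : Int) := by
  refine ⟨(PySem.Chars.findFrom_natCast_spec t p k hk h).1, ?_⟩
  rw [PySem.Chars.findFrom_natCast t p k hk] at h ⊢
  split at h
  · exact absurd rfl h
  · have h1 := PySem.Chars.find_le_length (t.drop k) p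
    simp only [List.length_drop] at h1
    split
    · omega
    · omega

-- min? on a nonempty list is a running fold keeping the earlier element on ties
theorem min?_cons_foldl {α : Type} (key : α → Int) (a : α) (l : List α) :
    PySem.List.min? (a :: l) key =
      some (l.foldl (fun m x => if key x < key m then x else m) a) := by
  simp only [PySem.List.min?, List.foldl_cons]
  induction l generalizing a with
  | nil => rfl
  | cons x xs ih =>
    simp only [List.foldl_cons]
    split
    · exact ih x
    · exact ih a

-- the running min stays put once nothing later beats it
theorem foldl_min_stays {α : Type} (key : α → Int) (w : α) (l : List α)
    (h : ∀ x ∈ l, ¬ key x < key w) :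
    l.foldl (fun m x => if key x < key m then x else m) w = w := by
  induction l with
  | nil => rfl
  | cons x xs ih =>
    simp only [List.foldl_cons]
    rw [if_neg (h x (by simp))]
    exact ih fun y hy => h y (by simp [hy])

-- every occurrence returned from start lies at index ≥ start
theorem findAllGo_ge (t p : List Char) :
    ∀ fuel start, ∀ y ∈ findAllGo t p fuel start, (start : Int) ≤ y.1 := by
  intro fuel
  induction fuel with
  | zero => intro start y hy; simp [findAllGo] at hy
  | succ n ih =>
    intro start y hy
    rw [findAllGo] at hy
    by_cases hpos : PySem.Chars.findFrom t p (start : Int) none = -1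
    · simp [hpos] at hy
    · by_cases hle : start ≤ t.length
      · have hb := findFrom_bounds t p start hle hpos
        simp only [hpos, if_false, List.mem_cons] at hy
        rcases hy with rfl | hy
        · exact hb.1
        · have := ih (Int.toNat (PySem.Chars.findFrom t p (start : Int) none) + 1) y hy
          omega
      · exact absurd (findFrom_gt_len t p start (by omega)) hpos

-- KEY: A's running fold over the remaining occurrences equals B's early-exit loop
theorem key_fold_eq (t p : List Char) (s : Int) :
    ∀ fuel (start : Nat) (prev : Int), prev < s → prev < (start : Int) →
      (findAllGo t p fuel start).foldl
          (fun m x => if |x.1 - s| < |m.1 - s| then x else m) (prev, prev + (p.length : Int))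
        = (closestGo t p s fuel start prev, closestGo t p s fuel start prev + (p.length : Int)) := by
  intro fuel
  induction fuel with
  | zero => intro start prev _ _; rw [findAllGo, closestGo]; rfl
  | succ n ih =>
    intro start prev hps hpl
    rw [findAllGo, closestGo]
    set pos := PySem.Chars.findFrom t p (start : Int) none with hposdef
    by_cases hpos : pos = -1
    · simp [hpos]
    · have hle : start ≤ t.length := by
        by_contra hle
        exact hpos (findFrom_gt_len t p start (by omega))
      have hb := findFrom_bounds t p start hle hpos
      have hge := findAllGo_ge t p n (pos.toNat + 1)
      simp only [hpos, if_false, List.foldl_cons]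
      by_cases hs : s ≤ pos
      · -- first occurrence at/past s: both sides settle immediately
        have hiff : |pos - s| < |prev - s| ↔ ¬ (s - prev ≤ pos - s) := by
          rw [abs_of_nonneg (by omega), abs_of_nonpos (by omega)]
          omega
        simp only [false_or, hs, if_true]
        by_cases hw : s - prev ≤ pos - s
        · rw [if_neg (by rw [hiff]; omega), if_pos hw]
          exact foldl_min_stays _ _ _ fun x hx => by
            have hx1 := hge x hx
            rw [abs_of_nonneg (by omega), abs_of_nonpos (by omega)]
            omega
        · rw [if_pos (hiff.2 hw), if_neg hw]
          exact foldl_min_stays _ _ _ fun x hx => by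
            have hx1 := hge x hx
            rw [abs_of_nonneg (by omega), abs_of_nonneg (by omega)]
            omega
      · -- occurrence before s: A's fold moves its min to it, B recurses with it as prev
        have : |pos - s| < |prev - s| := by
          rw [abs_of_nonpos (by omega), abs_of_nonpos (by omega)]
          omega
        rw [if_pos this]
        have hrec := ih (pos.toNat + 1) pos (by omega) (by omega)
        simp only [false_or, if_neg hs]
        exact hrec

-- per-variation: A's collect-then-min equals B's _closest
theorem perVariation (t p : List Char) (s : Int) :
    (if (find_all_occurrences t p).isEmpty then none
     else PySem.List.min? (find_all_occurrences t p) (fun x => |x.1 - s|)) = closest t p s := by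
  unfold find_all_occurrences closest
  simp only [findAllGo, closestGo]
  set pos := PySem.Chars.findFrom t p ((0 : Nat) : Int) none with hposdef
  have hcast : PySem.Chars.findFrom t p (0 : Int) none = pos := by norm_num [hposdef]
  by_cases hpos : pos = -1
  · simp [hpos, hcast]
  · have hb := findFrom_bounds t p 0 (Nat.zero_le _) hpos
    simp only [hpos, if_false, List.isEmpty_cons, Bool.false_eq_true, hcast]
    rw [min?_cons_foldl]
    by_cases hs : s ≤ pos
    · -- very first occurrence already at/past s: it is the answer on both sides
      have hge := findAllGo_ge t p t.length (pos.toNat + 1)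
      rw [foldl_min_stays _ _ _ fun x hx => by
        have hx1 := hge x hx
        rw [abs_of_nonneg (by omega), abs_of_nonneg (by omega)]
        omega]
      simp only [false_or, if_pos hs]
      split <;> rfl
    · have hrec := key_fold_eq t p s t.length (pos.toNat + 1) pos (by omega) (by omega)
      simp only [false_or, if_neg hs]
      rw [hrec]

-- the two loop shapes agree variation list by variation list
theorem tryVariations_eq_tryAlt (t : List Char) (s : Int) :
    ∀ vs, tryVariations t s vs = tryAlt t s vs := by
  intro vs
  induction vs with
  | nil => rfl
  | cons v rest ih =>
    rw [tryVariations, tryAlt, ← perVariation t v s]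
    by_cases h : (find_all_occurrences t v).isEmpty
    · simp [h, ih]
    · simp only [h, Bool.false_eq_true, if_false]
      obtain ⟨a, l, hL⟩ : ∃ a l, find_all_occurrences t v = a :: l := by
        cases hfa : find_all_occurrences t v with
        | nil => rw [hfa] at h; simp at h
        | cons a l => exact ⟨a, l, rfl⟩
      rw [hL, min?_cons_foldl]

-- A's two consecutive loops are B's one loop over the concatenated variation list
theorem tryAlt_append (t : List Char) (s : Int) (l1 l2 : List (List Char)) :
    tryAlt t s (l1 ++ l2) =
      match tryAlt t s l1 with
      | some r => some r
      | none => tryAlt t s l2 := by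
  induction l1 with
  | nil => rfl
  | cons v rest ih =>
    rw [List.cons_append, tryAlt, tryAlt]
    cases h : closest t v s with
    | some r => rfl
    | none => exact ih

-- ===== VERDICT (by name: the statement is the Claim_ definition above) =====
theorem try_fuzzy_fix_spec : Claim_equal_try_fuzzy_fix := by
  unfold Claim_equal_try_fuzzy_fix
  intro text expected_text s e _
  unfold Spec_try_fuzzy_fix try_fuzzy_fix try_fuzzy_fix_alt
  show (match tryVariations text.toList s
          [PySem.Chars.strip expected_text.toList, PySem.Chars.lstrip expected_text.toList,
           PySem.Chars.rstrip expected_text.toList, ' ' :: expected_text.toList,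
           expected_text.toList ++ [' '], ' ' :: (expected_text.toList ++ [' '])] with
        | some r => some r
        | none => tryVariations text.toList s
            [PySem.Chars.lower expected_text.toList, PySem.Chars.upper expected_text.toList,
             pyCapitalize expected_text.toList])
      = tryAlt text.toList s
          [PySem.Chars.strip expected_text.toList, PySem.Chars.lstrip expected_text.toList,
           PySem.Chars.rstrip expected_text.toList, ' ' :: expected_text.toList,
           expected_text.toList ++ [' '], ' ' :: (expected_text.toList ++ [' ']),
           PySem.Chars.lower expected_text.toList, PySem.Chars.upper expected_text.toList,
           pyCapitalize expected_text.toList]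
  rw [show [PySem.Chars.strip expected_text.toList, PySem.Chars.lstrip expected_text.toList,
        PySem.Chars.rstrip expected_text.toList, ' ' :: expected_text.toList,
        expected_text.toList ++ [' '], ' ' :: (expected_text.toList ++ [' ']),
        PySem.Chars.lower expected_text.toList, PySem.Chars.upper expected_text.toList,
        pyCapitalize expected_text.toList]
      = [PySem.Chars.strip expected_text.toList, PySem.Chars.lstrip expected_text.toList,
        PySem.Chars.rstrip expected_text.toList, ' ' :: expected_text.toList,
        expected_text.toList ++ [' '], ' ' :: (expected_text.toList ++ [' '])]
        ++ [PySem.Chars.lower expected_text.toList, PySem.Chars.upper expected_text.toList,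
        pyCapitalize expected_text.toList] from rfl]
  rw [tryAlt_append, ← tryVariations_eq_tryAlt, ← tryVariations_eq_tryAlt]
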